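-- pv_equiv track=rewrite | github.com/alinachadwick/fair_recommendations | pjr_ejr.py | _find_partition_recursive
-- ===== SOURCE A (Python) =====
-- import itertools
-- from typing import Dict, List, Set, Tuple
--
-- def _find_partition_recursive(remaining_voters: List[str], approvals: Dict[str, Set[str]],
--                             subgroups_needed: int, min_size: int,
--                             current_partition: List[List[str]], start_idx: int) -> bool:
--     """
--     Recursive helper to find a valid partition using backtracking.
--
--     Args:
--         remaining_voters: List of voters not yet assigned to subgroups
--         approvals: Voter approval mappings
--         subgroups_needed: Number of subgroups still needed
--         min_size: Minimum size for each subgroup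
--         current_partition: Current partial partition being built
--         start_idx: Starting index for generating combinations (to avoid duplicates)
--     """
--     # Base case: if we've found all needed subgroups
--     if subgroups_needed == 0:
--         return len(remaining_voters) == 0  # All voters should be assigned
--
--     # If not enough voters left to form remaining subgroups
--     if len(remaining_voters) < subgroups_needed * min_size:
--         return False
--
--     # Try different subgroup sizes (from min_size up to what's reasonable)
--     max_reasonable_size = len(remaining_voters) - (subgroups_needed - 1) * min_size
--
--     # Generate all possible subgroups of valid size
--     for size in range(min_size, max_reasonable_size + 1):
--         # Try all combinations of 'size' voters from remaining_voters
--         for subgroup in itertools.combinations(remaining_voters, size):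
--             # Check if this subgroup is cohesive (has common approvals)
--             if _is_cohesive_subgroup(subgroup, approvals):
--                 # Create new remaining voters list without this subgroup
--                 new_remaining = [v for v in remaining_voters if v not in subgroup]
--
--                 # Recursively try to partition the remaining voters
--                 new_partition = current_partition + [list(subgroup)]
--                 if _find_partition_recursive(new_remaining, approvals, subgroups_needed - 1,
--                                            min_size, new_partition, 0):
--                     return True
--
--     return False
--
-- def _is_cohesive_subgroup(voters: Tuple[str], approvals: Dict[str, Set[str]]) -> bool:
--     """
--     Check if a group of voters is cohesive (they have at least one commonly approved candidate).
--     """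
--     if not voters:
--         return False
--
--     # Find intersection of all voters' approvals
--     common_approvals = approvals[voters[0]].copy()
--     for voter in voters[1:]:
--         common_approvals &= approvals[voter]
--
--     return len(common_approvals) > 0
-- ===== SOURCE B (Python) =====
-- import itertools
--
--
-- def _has_common_candidate(voters, approvals):
--     if not voters:
--         return False
--     first_approvals = approvals[voters[0]]
--     return any(all(c in approvals[v] for v in voters[1:]) for c in first_approvals)
--
--
-- def _find_partition_recursive(remaining_voters, approvals, subgroups_needed,
--                               min_size, current_partition, start_idx):
--     # Symmetry-free backtracking: the first remaining voter must belong to some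
--     # subgroup, so only subgroups containing it are tried (removes the
--     # subgroup-ordering redundancy of enumerating every subgroup first).
--     if subgroups_needed == 0:
--         return len(remaining_voters) == 0
--     if len(remaining_voters) < subgroups_needed * min_size:
--         return False
--     if not remaining_voters:
--         return False
--     first = remaining_voters[0]
--     rest = remaining_voters[1:]
--     max_extra = len(remaining_voters) - (subgroups_needed - 1) * min_size - 1
--     for extra in range(max(min_size - 1, 0), max_extra + 1):
--         for others in itertools.combinations(rest, extra):
--             subgroup = [first, *others]
--             if _has_common_candidate(subgroup, approvals):
--                 new_remaining = [v for v in rest if v not in others]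
--                 if _find_partition_recursive(new_remaining, approvals,
--                                              subgroups_needed - 1, min_size,
--                                              current_partition + [subgroup], 0):
--                     return True
--     return False
-- ===== Notes on version B (the rewrite author's own statement) =====
-- stated objective: alternative
-- what changed: A enumerates every cohesive subgroup of every admissible size at each recursion level; B removes the subgroup-ordering symmetry by forcing the first remaining voter into the subgroup chosen at each level (only co-member sets drawn from the remaining voters are enumerated), and tests cohesion with an any/all scan instead of building set intersections.
-- outside the precondition, e.g. on _find_partition_recursive(['a', 'a'], {'a': ['x']}, 2, 1, [], 0): A returns False, B returns True
import Mathlib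
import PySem

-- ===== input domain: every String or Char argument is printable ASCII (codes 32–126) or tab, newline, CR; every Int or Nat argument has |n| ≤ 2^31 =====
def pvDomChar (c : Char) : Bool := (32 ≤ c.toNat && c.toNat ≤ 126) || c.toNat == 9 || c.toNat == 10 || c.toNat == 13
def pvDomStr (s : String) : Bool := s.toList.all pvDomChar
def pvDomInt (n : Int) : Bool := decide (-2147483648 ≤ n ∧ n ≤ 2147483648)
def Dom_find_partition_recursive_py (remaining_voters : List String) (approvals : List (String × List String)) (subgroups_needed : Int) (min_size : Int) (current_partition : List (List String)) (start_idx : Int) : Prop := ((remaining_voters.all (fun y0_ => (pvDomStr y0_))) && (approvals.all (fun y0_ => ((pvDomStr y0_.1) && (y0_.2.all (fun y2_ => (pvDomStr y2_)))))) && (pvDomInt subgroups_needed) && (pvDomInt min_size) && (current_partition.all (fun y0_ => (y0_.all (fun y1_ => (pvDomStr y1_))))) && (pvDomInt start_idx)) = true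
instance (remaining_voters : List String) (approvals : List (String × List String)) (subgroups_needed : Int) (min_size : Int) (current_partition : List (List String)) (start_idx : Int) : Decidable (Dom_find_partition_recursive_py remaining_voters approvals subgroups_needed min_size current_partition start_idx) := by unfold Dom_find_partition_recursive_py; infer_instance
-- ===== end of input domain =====

-- B replaces A's enumeration of ALL candidate subgroups at each level by a symmetry-free
-- backtracking search that only tries subgroups containing the first remaining voter
-- (a genuinely different exploration of the same partition space; objective: alternative).

-- termination fact used by port A's recursion (cited in decreasing_by)
theorem pv_filter_remove_lt {S R : List String} (hS : S.Sublist R) (hne : S ≠ []) :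
    (R.filter (fun v => !(S.contains v))).length < R.length := by
  rcases S with _ | ⟨x, S'⟩
  · exact absurd rfl hne
  · refine List.length_filter_lt_length_iff_exists.mpr ⟨x, hS.subset (by simp), ?_⟩
    simp

-- ===== PORT A =====
-- _is_cohesive_subgroup: intersection of the voters' approval sets is nonempty
def pv_cohesive (voters : List String) (approvals : List (String × List String)) : Bool :=
  match voters with
  | [] => false
  | v0 :: rest =>
      let d := PySem.Dict.mk approvals
      let common := rest.foldl (fun acc v => PySem.Set.inter acc (d.getD v [])) (d.getD v0 [])
      decide (0 < PySem.Set.len common)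

def find_partition_recursive_py (remaining_voters : List String) (approvals : List (String × List String)) (subgroups_needed : Int) (min_size : Int) (current_partition : List (List String)) (start_idx : Int) : Bool :=
  if subgroups_needed = 0 then decide (remaining_voters.length = 0)
  else if (remaining_voters.length : Int) < subgroups_needed * min_size then false
  else
    let max_reasonable_size : Int := (remaining_voters.length : Int) - (subgroups_needed - 1) * min_size
    (PySem.List.pyRange min_size (max_reasonable_size + 1) 1).any (fun size =>
      (PySem.List.combinations remaining_voters size.toNat).attach.any (fun sub =>
        if h : pv_cohesive sub.1 approvals = true then
          find_partition_recursive_py (remaining_voters.filter (fun v => !(sub.1.contains v))) approvals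
            (subgroups_needed - 1) min_size (current_partition ++ [sub.1]) 0
        else false))
termination_by remaining_voters.length
decreasing_by
  have hmem := (PySem.List.mem_combinations_iff _ _ _).mp sub.2
  have hne : sub.1 ≠ [] := by intro he; rw [he] at h; simp [pv_cohesive] at h
  have h3 := pv_filter_remove_lt hmem.1 hne
  rw [← List.countP_eq_length_filter] at h3
  simp only [List.length_unattach, ← List.countP_eq_length_filter]
  rw [List.countP_attach (p := fun v => !(sub.1.contains v))]
  exact h3

-- ===== PORT B =====
-- _has_common_candidate: some candidate approved by the first voter is approved by all
def pv_has_common (voters : List String) (approvals : List (String × List String)) : Bool :=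
  match voters with
  | [] => false
  | v0 :: rest =>
      let d := PySem.Dict.mk approvals
      (d.getD v0 []).any (fun c => rest.all (fun v => (d.getD v []).contains c))

def find_partition_recursive_py_alt (remaining_voters : List String) (approvals : List (String × List String)) (subgroups_needed : Int) (min_size : Int) (current_partition : List (List String)) (start_idx : Int) : Bool :=
  if subgroups_needed = 0 then decide (remaining_voters.length = 0)
  else if (remaining_voters.length : Int) < subgroups_needed * min_size then false
  else
    match remaining_voters with
    | [] => false
    | first :: rest =>
        let max_extra : Int := ((first :: rest).length : Int) - (subgroups_needed - 1) * min_size - 1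
        (PySem.List.pyRange (max (min_size - 1) 0) (max_extra + 1) 1).any (fun extra =>
          (PySem.List.combinations rest extra.toNat).attach.any (fun others =>
            if h : pv_has_common (first :: others.1) approvals = true then
              find_partition_recursive_py_alt (rest.filter (fun v => !(others.1.contains v))) approvals
                (subgroups_needed - 1) min_size (current_partition ++ [first :: others.1]) 0
            else false))
termination_by remaining_voters.length
decreasing_by
  have h2 := List.countP_le_length (l := rest) (p := fun v => !(others.1.contains v))
  simp only [List.length_cons, List.length_unattach, ← List.countP_eq_length_filter]
  rw [List.countP_attach (p := fun v => !(others.1.contains v))]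
  omega

-- ===== PRECONDITION & SPEC =====
-- Pre_ excludes exactly: inputs where A raises (KeyError for a voter missing from approvals,
-- ValueError for a negative subgroup size reaching itertools.combinations) — unless A's two
-- shortcut branches return first — and lists with DUPLICATE voter names, on which A's
-- "remove every copy of any chosen voter" filter yields accidental results (a partition of a
-- duplicate-free voter set is the function's natural domain).
def Pre_find_partition_recursive_py (remaining_voters : List String) (approvals : List (String × List String)) (subgroups_needed : Int) (min_size : Int) (current_partition : List (List String)) (start_idx : Int) : Prop :=
  subgroups_needed = 0 ∨ (remaining_voters.length : Int) < subgroups_needed * min_size ∨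
    (0 ≤ min_size ∧ remaining_voters.Nodup ∧ ∀ v ∈ remaining_voters, v ∈ approvals.map Prod.fst)
instance (remaining_voters : List String) (approvals : List (String × List String)) (subgroups_needed : Int) (min_size : Int) (current_partition : List (List String)) (start_idx : Int) : Decidable (Pre_find_partition_recursive_py remaining_voters approvals subgroups_needed min_size current_partition start_idx) := by unfold Pre_find_partition_recursive_py; infer_instance

def pvWitness_find_partition_recursive_py : List String × (List (String × List String)) × Int × Int × List (List String) × Int :=
  (["a", "b"], [("a", ["x"]), ("b", ["x", "y"])], 1, 1, [], 0)

def Spec_find_partition_recursive_py (remaining_voters : List String) (approvals : List (String × List String)) (subgroups_needed : Int) (min_size : Int) (current_partition : List (List String)) (start_idx : Int) (out : Bool) : Prop := out = find_partition_recursive_py_alt remaining_voters approvals subgroups_needed min_size current_partition start_idx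
instance (remaining_voters : List String) (approvals : List (String × List String)) (subgroups_needed : Int) (min_size : Int) (current_partition : List (List String)) (start_idx : Int) (out : Bool) : Decidable (Spec_find_partition_recursive_py remaining_voters approvals subgroups_needed min_size current_partition start_idx out) := by unfold Spec_find_partition_recursive_py; infer_instance

-- ===== CLAIM (what is proved, stated in full; the proofs are below) =====
def Claim_equal_find_partition_recursive_py : Prop := ∀ (remaining_voters : List String) (approvals : List (String × List String)) (subgroups_needed : Int) (min_size : Int) (current_partition : List (List String)) (start_idx : Int), Dom_find_partition_recursive_py remaining_voters approvals subgroups_needed min_size current_partition start_idx → Pre_find_partition_recursive_py remaining_voters approvals subgroups_needed min_size current_partition start_idx → Spec_find_partition_recursive_py remaining_voters approvals subgroups_needed min_size current_partition start_idx (find_partition_recursive_py remaining_voters approvals subgroups_needed min_size current_partition start_idx)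

-- ===== LEMMAS AND PROOFS =====

-- membership in the running intersection of A's cohesiveness loop
theorem pv_mem_foldl_inter (g : String → List String) (rest : List String) :
    ∀ (init : List String) (x : String),
      x ∈ rest.foldl (fun acc v => PySem.Set.inter acc (g v)) init ↔ x ∈ init ∧ ∀ v ∈ rest, x ∈ g v := by
  induction rest with
  | nil => intro init x; simp
  | cons r rest ih =>
      intro init x
      simp only [List.foldl_cons, ih, PySem.Set.mem_inter, List.mem_cons]
      constructor
      · rintro ⟨⟨h1, h2⟩, h3⟩
        refine ⟨h1, fun v hv => ?_⟩
        rcases hv with rfl | hv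
        · exact h2
        · exact h3 v hv
      · rintro ⟨h1, h2⟩
        exact ⟨⟨h1, h2 r (Or.inl rfl)⟩, fun v hv => h2 v (Or.inr hv)⟩

-- A's and B's cohesiveness tests agree
theorem pv_coh_iff (S : List String) (a : List (String × List String)) :
    pv_has_common S a = pv_cohesive S a := by
  cases S with
  | nil => rfl
  | cons v0 rest =>
      apply Bool.eq_iff_iff.mpr
      simp only [pv_has_common, pv_cohesive, List.any_eq_true, List.all_eq_true,
        decide_eq_true_eq, PySem.Set.len, List.contains_iff_mem]
      constructor
      · rintro ⟨c, hc, hall⟩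
        have hmem : c ∈ rest.foldl (fun acc v => PySem.Set.inter acc ((PySem.Dict.mk a).getD v [])) ((PySem.Dict.mk a).getD v0 []) :=
          (pv_mem_foldl_inter _ rest _ c).mpr ⟨hc, hall⟩
        exact_mod_cast List.length_pos_of_mem hmem
      · intro h
        rcases List.exists_mem_of_length_pos (l := rest.foldl (fun acc v => PySem.Set.inter acc ((PySem.Dict.mk a).getD v [])) ((PySem.Dict.mk a).getD v0 [])) (by exact_mod_cast h) with ⟨c, hc⟩
        rcases (pv_mem_foldl_inter _ rest _ c).mp hc with ⟨h1, h2⟩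
        exact ⟨c, h1, h2⟩

-- removing a duplicate-free sublist removes exactly its length
theorem pv_length_filter {S R : List String} (hnd : R.Nodup) (hS : S.Sublist R) :
    (R.filter (fun v => !(S.contains v))).length = R.length - S.length := by
  induction hS with
  | slnil => simp
  | @cons S R' x h ih =>
      have hxR : x ∉ R' := (List.nodup_cons.mp hnd).1
      have hxS : x ∉ S := fun hx => hxR (h.subset hx)
      have hle := h.length_le
      rw [List.filter_cons]
      have hc : (!(S.contains x)) = true := by simp [hxS]
      rw [hc, if_pos rfl, List.length_cons, ih (List.nodup_cons.mp hnd).2]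
      simp only [List.length_cons]
      omega
  | @cons₂ S R' x h ih =>
      have hxR : x ∉ R' := (List.nodup_cons.mp hnd).1
      rw [List.filter_cons]
      have hc : (!((x :: S).contains x)) = false := by simp
      rw [hc, if_neg (by simp)]
      have hcongr : R'.filter (fun v => !((x :: S).contains v)) = R'.filter (fun v => !(S.contains v)) := by
        apply List.filter_congr
        intro y hy
        have hyx : y ≠ x := fun he => hxR (he ▸ hy)
        simp [hyx]
      rw [hcongr, ih (List.nodup_cons.mp hnd).2]
      simp only [List.length_cons]
      omega

-- the specification both searches decide: R splits into k cohesive subgroups of size ≥ m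
inductive pvOk (a : List (String × List String)) (m : Int) : List String → Int → Prop
  | nil : pvOk a m [] 0
  | step {R S : List String} {k : Int} :
      S.Sublist R → S ≠ [] → pv_cohesive S a = true → m ≤ (S.length : Int) →
      pvOk a m (R.filter (fun v => !(S.contains v))) (k - 1) → pvOk a m R k

theorem pvOk_nonneg {a m R k} (h : pvOk a m R k) : 0 ≤ k := by
  induction h with
  | nil => omega
  | step _ _ _ _ _ ih => omega

theorem pvOk_zero {a m R} (h : pvOk a m R 0) : R = [] := by
  cases h with
  | nil => rfl
  | step _ _ _ _ h5 => exact absurd (pvOk_nonneg h5) (by omega)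

theorem pvOk_length {a : List (String × List String)} {m : Int} :
    ∀ {R : List String} {k : Int}, pvOk a m R k → R.Nodup → k * m ≤ (R.length : Int) := by
  intro R k h
  induction h with
  | nil => intro _; simp
  | @step R S k hS hne hc hmS hrec ih =>
      intro hnd
      have h1 := ih (hnd.filter _)
      rw [pv_length_filter hnd hS] at h1
      have hle := hS.length_le
      have hcast : (((R.length - S.length : Nat)) : Int) = (R.length : Int) - (S.length : Int) := by
        omega
      rw [hcast] at h1
      have hk : k * m = (k - 1) * m + m := by ring
      linarith

-- group order is exchangeable: any member of R lies in a subgroup that can come first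
theorem pvOk_pull {a m : _} : ∀ {R : List String} {k : Int}, pvOk a m R k → ∀ x ∈ R,
    ∃ S : List String, S.Sublist R ∧ S ≠ [] ∧ pv_cohesive S a = true ∧ m ≤ (S.length : Int) ∧ x ∈ S ∧
      pvOk a m (R.filter (fun v => !(S.contains v))) (k - 1) := by
  intro R k h
  induction h with
  | nil => intro x hx; simp at hx
  | @step R S k hS hne hc hmS hrec ih =>
      intro x hx
      by_cases hxS : x ∈ S
      · exact ⟨S, hS, hne, hc, hmS, hxS, hrec⟩
      · have hxf : x ∈ R.filter (fun v => !(S.contains v)) := by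
          refine List.mem_filter.mpr ⟨hx, ?_⟩
          simp [hxS]
        obtain ⟨T, hT, hTne, hTc, hTm, hxT, hTrec⟩ := ih x hxf
        have hTR : T.Sublist R := hT.trans (List.filter_sublist (l := R) (p := fun v => !(S.contains v)))
        have hdisj : ∀ y ∈ S, y ∉ T := by
          intro y hyS hyT
          have h2 := (List.mem_filter.mp (hT.subset hyT)).2
          simp [hyS] at h2
        have hSf : S.Sublist (R.filter (fun v => !(T.contains v))) := by
          have h2 := hS.filter (p := fun v => !(T.contains v))
          rwa [List.filter_eq_self.mpr (fun y hy => by simp [hdisj y hy])] at h2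
        refine ⟨T, hTR, hTne, hTc, hTm, hxT, pvOk.step hSf hne hc hmS ?_⟩
        simpa [List.filter_filter, Bool.and_comm] using hTrec

theorem pv_filter_cons (r0 : String) (rest O : List String) (hr0 : r0 ∉ rest) :
    (r0 :: rest).filter (fun v => !((r0 :: O).contains v)) = rest.filter (fun v => !(O.contains v)) := by
  rw [List.filter_cons]
  have hc : (!((r0 :: O).contains r0)) = false := by simp
  rw [hc, if_neg (by simp)]
  apply List.filter_congr
  intro y hy
  have hyx : y ≠ r0 := fun he => hr0 (he ▸ hy)
  simp [hyx]

theorem pv_A_iff_Ok (a : List (String × List String)) (m : Int) (hm : 0 ≤ m) :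
    ∀ (n : Nat) (R : List String), R.length = n → R.Nodup → ∀ (k : Int) (cp : List (List String)) (si : Int),
      (find_partition_recursive_py R a k m cp si = true ↔ pvOk a m R k) := by
  intro n
  induction n using Nat.strong_induction_on with
  | _ n IH =>
    intro R hlen hnd k cp si
    rw [find_partition_recursive_py.eq_def]
    by_cases hk : k = 0
    · subst hk
      rw [if_pos rfl]
      constructor
      · intro h
        have hR : R = [] := List.length_eq_zero_iff.mp (of_decide_eq_true h)
        subst hR
        exact pvOk.nil
      · intro h
        rw [pvOk_zero h]
        simp
    · rw [if_neg hk]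
      by_cases hsz : (R.length : Int) < k * m
      · rw [if_pos hsz]
        simp only [Bool.false_eq_true, false_iff]
        intro h
        exact absurd (pvOk_length h hnd) (not_le.mpr hsz)
      · rw [if_neg hsz]
        simp only [List.any_eq_true, List.mem_attach, true_and, Subtype.exists]
        constructor
        · rintro ⟨size, hsmem, sub, hsubmem, h3⟩
          by_cases hc : pv_cohesive sub a = true
          · rw [dif_pos hc] at h3
            obtain ⟨hS, hLen⟩ := (PySem.List.mem_combinations_iff _ _ _).mp hsubmem
            have hne : sub ≠ [] := by
              intro he
              rw [he] at hc
              simp [pv_cohesive] at hc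
            have hlt : (R.filter (fun v => !(sub.contains v))).length < n :=
              hlen ▸ pv_filter_remove_lt hS hne
            have hOk := (IH _ hlt _ rfl (hnd.filter _) (k - 1) (cp ++ [sub]) 0).mp h3
            have hrange := (PySem.List.mem_pyRange_one).mp hsmem
            have hmS : m ≤ (sub.length : Int) := by
              rw [hLen]
              have h0 : 0 ≤ size := le_trans hm hrange.1
              omega
            exact pvOk.step hS hne hc hmS hOk
          · rw [dif_neg hc] at h3
            exact absurd h3 (by simp)
        · intro h
          cases h with
          | nil => exact absurd rfl hk
          | @step R S k hS hne hc hmS hrec =>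
            have hOkall : pvOk a m R k := pvOk.step hS hne hc hmS hrec
            have hlenk := pvOk_length hOkall hnd
            have hle := hS.length_le
            have hup : (S.length : Int) ≤ (R.length : Int) - (k - 1) * m := by
              have h2 := pvOk_length hrec (hnd.filter _)
              rw [pv_length_filter hnd hS] at h2
              have hc2 : ((R.length - S.length : Nat) : Int) = (R.length : Int) - (S.length : Int) := by
                omega
              rw [hc2] at h2
              linarith
            have hmemc : S ∈ PySem.List.combinations R ((S.length : Int)).toNat :=
              (PySem.List.mem_combinations_iff _ _ _).mpr ⟨hS, by simp⟩
            refine ⟨(S.length : Int), (PySem.List.mem_pyRange_one).mpr ⟨hmS, by linarith⟩, S, hmemc, ?_⟩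
            rw [dif_pos hc]
            have hlt : (R.filter (fun v => !(S.contains v))).length < n :=
              hlen ▸ pv_filter_remove_lt hS hne
            exact (IH _ hlt _ rfl (hnd.filter _) (k - 1) (cp ++ [S]) 0).mpr hrec

theorem pv_B_iff_Ok (a : List (String × List String)) (m : Int) (hm : 0 ≤ m) :
    ∀ (n : Nat) (R : List String), R.length = n → R.Nodup → ∀ (k : Int) (cp : List (List String)) (si : Int),
      (find_partition_recursive_py_alt R a k m cp si = true ↔ pvOk a m R k) := by
  intro n
  induction n using Nat.strong_induction_on with
  | _ n IH =>
    intro R hlen hnd k cp si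
    rw [find_partition_recursive_py_alt.eq_def]
    by_cases hk : k = 0
    · subst hk
      rw [if_pos rfl]
      constructor
      · intro h
        have hR : R = [] := List.length_eq_zero_iff.mp (of_decide_eq_true h)
        subst hR
        exact pvOk.nil
      · intro h
        rw [pvOk_zero h]
        simp
    · rw [if_neg hk]
      by_cases hsz : (R.length : Int) < k * m
      · rw [if_pos hsz]
        simp only [Bool.false_eq_true, false_iff]
        intro h
        exact absurd (pvOk_length h hnd) (not_le.mpr hsz)
      · rw [if_neg hsz]
        cases R with
        | nil =>
            constructor
            · intro h
              exact absurd h (by simp)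
            · intro h
              cases h with
              | nil => exact absurd rfl hk
              | step hS hne _ _ _ => exact absurd (List.sublist_nil.mp hS) hne
        | cons first rest =>
            have hr0 : first ∉ rest := (List.nodup_cons.mp hnd).1
            have hndr : rest.Nodup := (List.nodup_cons.mp hnd).2
            simp only [List.any_eq_true, List.mem_attach, true_and, Subtype.exists]
            constructor
            · rintro ⟨extra, hemem, O, hOmem, h3⟩
              by_cases hc : pv_has_common (first :: O) a = true
              · rw [dif_pos hc] at h3
                obtain ⟨hO, hOLen⟩ := (PySem.List.mem_combinations_iff _ _ _).mp hOmem
                have hrange := (PySem.List.mem_pyRange_one).mp hemem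
                have hcco : pv_cohesive (first :: O) a = true := by
                  rw [← pv_coh_iff]
                  exact hc
                have hS : (first :: O).Sublist (first :: rest) := hO.cons₂ first
                have h0 : (0 : Int) ≤ extra := le_trans (le_max_right _ _) hrange.1
                have hOlenInt : (O.length : Int) = extra := by
                  rw [hOLen]
                  omega
                have hmS : m ≤ ((first :: O).length : Int) := by
                  have h1 : m - 1 ≤ extra := le_trans (le_max_left _ _) hrange.1
                  simp only [List.length_cons]
                  push_cast
                  omega
                have hlt : (rest.filter (fun v => !(O.contains v))).length < n := by
                  have h4 := List.length_filter_le (fun v => !(O.contains v)) rest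
                  simp only [List.length_cons] at hlen
                  omega
                have hOk := (IH _ hlt _ rfl (hndr.filter _) (k - 1) (cp ++ [first :: O]) 0).mp h3
                refine pvOk.step hS (by simp) hcco hmS ?_
                rw [pv_filter_cons first rest O hr0]
                exact hOk
              · rw [dif_neg hc] at h3
                exact absurd h3 (by simp)
            · intro h
              obtain ⟨S, hS, hne, hc, hmS, hfirstS, hrec⟩ := pvOk_pull h first List.mem_cons_self
              rcases List.sublist_cons_iff.mp hS with hS' | ⟨O, rfl, hO⟩
              · exact absurd (hS'.subset hfirstS) hr0
              · have hOkall : pvOk a m (first :: rest) k := pvOk.step hS hne hc hmS hrec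
                have hlenk := pvOk_length hOkall hnd
                have hle := hS.length_le
                have hup : (((first :: O).length : Int)) ≤ (((first :: rest).length : Int)) - (k - 1) * m := by
                  have h2 := pvOk_length hrec (hnd.filter _)
                  rw [pv_length_filter hnd hS] at h2
                  have hc2 : (((first :: rest).length - (first :: O).length : Nat) : Int) = (((first :: rest).length : Int)) - (((first :: O).length : Int)) := by
                    omega
                  rw [hc2] at h2
                  linarith
                have hlt : (rest.filter (fun v => !(O.contains v))).length < n := by
                  have h4 := List.length_filter_le (fun v => !(O.contains v)) rest
                  simp only [List.length_cons] at hlen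
                  omega
                refine ⟨(O.length : Int), (PySem.List.mem_pyRange_one).mpr ⟨?_, ?_⟩, O,
                  (PySem.List.mem_combinations_iff _ _ _).mpr ⟨hO, by simp⟩, ?_⟩
                · apply max_le
                  · simp only [List.length_cons] at hmS
                    push_cast at hmS ⊢
                    omega
                  · positivity
                · simp only [List.length_cons] at hup ⊢
                  push_cast at hup ⊢
                  linarith
                · rw [dif_pos (by rw [pv_coh_iff]; exact hc)]
                  rw [pv_filter_cons first rest O hr0] at hrec
                  exact (IH _ hlt _ rfl (hndr.filter _) (k - 1) (cp ++ [first :: O]) 0).mpr hrec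

-- ===== VERDICT (by name: the statement is the Claim_ definition above) =====
theorem find_partition_recursive_py_spec : Claim_equal_find_partition_recursive_py := by
  intro R a k m cp si _ hpre
  unfold Spec_find_partition_recursive_py
  by_cases hk : k = 0
  · subst hk
    rw [find_partition_recursive_py.eq_def, find_partition_recursive_py_alt.eq_def]
    simp
  · by_cases hsz : (R.length : Int) < k * m
    · rw [find_partition_recursive_py.eq_def, find_partition_recursive_py_alt.eq_def, if_neg hk, if_neg hk,
        if_pos hsz, if_pos hsz]
    · rcases hpre with h | h | ⟨hm, hnd, _⟩
      · exact absurd h hk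
      · exact absurd h hsz
      · exact Bool.eq_iff_iff.mpr
          ((pv_A_iff_Ok a m hm R.length R rfl hnd k cp si).trans
            (pv_B_iff_Ok a m hm R.length R rfl hnd k cp si).symm)
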